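-- pv_equiv track=rewrite | github.com/higginator/OpenClassrooms | real_OC/helpers.py | split_days
-- ===== SOURCE A (Python) =====
-- all_days = {'M': 'Monday',
-- 			'Tu': 'Tuesday',
-- 			'W': 'Wednesday',
-- 			'Th': 'Thursday',
-- 			'F': 'Friday'}
--
-- def split_days(days):
-- 	#returns a list of all days
-- 	# >>> split_days('MTuWTh')
-- 	# ['M', 'Tu', 'W', 'Th']
-- 	# >>> split_days('TuThF')
-- 	# ['Tu', 'Th', 'F']
-- 	results = []
-- 	i = 0
-- 	while i < len(days):
-- 		if days[i] in all_days:
-- 			results.append(all_days[days[i]])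
-- 		elif days[i: i+2] in all_days:
-- 			results.append(all_days[days[i: i+2]])
-- 		i += 1
-- 	return results
-- ===== SOURCE B (Python) =====
-- all_days = {'M': 'Monday',
--             'Tu': 'Tuesday',
--             'W': 'Wednesday',
--             'Th': 'Thursday',
--             'F': 'Friday'}
--
-- def split_days(days):
--     # consuming tokenizer: try the two-char code first, then advance past the match
--     results = []
--     i = 0
--     n = len(days)
--     while i < n:
--         pair = days[i:i+2]
--         if pair in all_days:
--             results.append(all_days[pair])
--             i += 2
--         elif days[i] in all_days:
--             results.append(all_days[days[i]])
--             i += 1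
--         else:
--             i += 1
--     return results
-- ===== Notes on version B (the rewrite author's own statement) =====
-- stated objective: alternative
-- what changed: A scans every index with a non-consuming check (single-char key first, then two-char slice, always i += 1); B is a consuming tokenizer that tries the two-letter code first and advances past the whole matched token.
import Mathlib
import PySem

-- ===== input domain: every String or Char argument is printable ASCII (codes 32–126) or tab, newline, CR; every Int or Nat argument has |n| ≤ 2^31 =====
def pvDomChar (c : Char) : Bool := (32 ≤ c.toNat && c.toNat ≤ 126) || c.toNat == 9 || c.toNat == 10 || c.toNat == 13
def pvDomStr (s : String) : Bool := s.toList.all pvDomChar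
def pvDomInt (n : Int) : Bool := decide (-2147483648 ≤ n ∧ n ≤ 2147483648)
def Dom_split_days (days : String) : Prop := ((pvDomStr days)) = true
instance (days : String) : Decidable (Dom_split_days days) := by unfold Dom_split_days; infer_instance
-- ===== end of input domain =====

-- B replaces A's per-index scan (always i += 1) by a consuming tokenizer that tries the
-- two-letter code first and advances past the whole match; proved to return the same list.

-- ===== PORT A =====
-- the module-level dict all_days
def pvAllDays : PySem.Dict String String :=
  PySem.Dict.ofList [("M","Monday"),("Tu","Tuesday"),("W","Wednesday"),("Th","Thursday"),("F","Friday")]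

-- A's while loop over i: recursion on the suffix days[i:]; days[i] is its head,
-- days[i:i+2] is its first two characters; i += 1 = recurse on the tail.
def pvGoA : List Char → List String
  | [] => []
  | c :: rest =>
    match pvAllDays.get? (String.ofList [c]) with
    | some v => v :: pvGoA rest
    | none =>
      match pvAllDays.get? (String.ofList (List.take 2 (c :: rest))) with
      | some v => v :: pvGoA rest
      | none => pvGoA rest

def split_days (days : String) : List String := pvGoA days.toList

-- ===== PORT B =====
-- B's while loop: pair = days[i:i+2]; if it is a key advance i by 2, else try days[i], advance by 1.
-- At the last character pair and days[i] are the same one-character string, hence the single lookup.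
def pvGoB : List Char → List String
  | [] => []
  | [c] =>
    match pvAllDays.get? (String.ofList [c]) with
    | some v => [v]
    | none => []
  | c1 :: c2 :: rest =>
    match pvAllDays.get? (String.ofList [c1, c2]) with
    | some v => v :: pvGoB rest
    | none =>
      match pvAllDays.get? (String.ofList [c1]) with
      | some v => v :: pvGoB (c2 :: rest)
      | none => pvGoB (c2 :: rest)

def split_days_alt (days : String) : List String := pvGoB days.toList

-- ===== PRECONDITION & SPEC =====
def Spec_split_days (days : String) (out : List String) : Prop := out = split_days_alt days
instance (days : String) (out : List String) : Decidable (Spec_split_days days out) := by unfold Spec_split_days; infer_instance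

-- ===== CLAIM (what is proved, stated in full; the proofs are below) =====
def Claim_equal_split_days : Prop := ∀ (days : String), Dom_split_days days → Spec_split_days days (split_days days)

-- ===== LEMMAS AND PROOFS =====
theorem pvBeqOfListFalse (s : String) (l : List Char) (h : s.toList ≠ l) :
    (s == String.ofList l) = false := by
  rw [beq_eq_false_iff_ne]
  intro he
  exact h (by rw [he, String.toList_ofList])

theorem pvAllDays_eq :
    pvAllDays = PySem.Dict.mk
      [("M","Monday"),("Tu","Tuesday"),("W","Wednesday"),("Th","Thursday"),("F","Friday")] := by
  decide

theorem pvLookup1 (c : Char) :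
    pvAllDays.get? (String.ofList [c]) =
      if c = 'M' then some "Monday" else if c = 'W' then some "Wednesday"
      else if c = 'F' then some "Friday" else none := by
  by_cases h1 : c = 'M'
  · subst h1; decide
  by_cases h2 : c = 'W'
  · subst h2; decide
  by_cases h3 : c = 'F'
  · subst h3; decide
  have kM : ("M" == String.ofList [c]) = false :=
    pvBeqOfListFalse _ _ (by simp; exact Ne.symm h1)
  have kTu : ("Tu" == String.ofList [c]) = false :=
    pvBeqOfListFalse _ _ (by simp)
  have kW : ("W" == String.ofList [c]) = false :=
    pvBeqOfListFalse _ _ (by simp; exact Ne.symm h2)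
  have kTh : ("Th" == String.ofList [c]) = false :=
    pvBeqOfListFalse _ _ (by simp)
  have kF : ("F" == String.ofList [c]) = false :=
    pvBeqOfListFalse _ _ (by simp; exact Ne.symm h3)
  simp [pvAllDays_eq, PySem.Dict.get?, List.find?, kM, kTu, kW, kTh, kF, h1, h2, h3]

theorem pvLookup2 (a b : Char) :
    pvAllDays.get? (String.ofList [a, b]) =
      if a = 'T' ∧ b = 'u' then some "Tuesday"
      else if a = 'T' ∧ b = 'h' then some "Thursday" else none := by
  by_cases h1 : a = 'T' ∧ b = 'u'
  · obtain ⟨ha, hb⟩ := h1; subst ha; subst hb; decide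
  by_cases h2 : a = 'T' ∧ b = 'h'
  · obtain ⟨ha, hb⟩ := h2; subst ha; subst hb; decide
  have kM : ("M" == String.ofList [a, b]) = false := pvBeqOfListFalse _ _ (by simp)
  have kTu : ("Tu" == String.ofList [a, b]) = false :=
    pvBeqOfListFalse _ _ (by simp; intro ha hb; exact h1 ⟨ha.symm, hb.symm⟩)
  have kW : ("W" == String.ofList [a, b]) = false := pvBeqOfListFalse _ _ (by simp)
  have kTh : ("Th" == String.ofList [a, b]) = false :=
    pvBeqOfListFalse _ _ (by simp; intro ha hb; exact h2 ⟨ha.symm, hb.symm⟩)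
  have kF : ("F" == String.ofList [a, b]) = false := pvBeqOfListFalse _ _ (by simp)
  simp [pvAllDays_eq, PySem.Dict.get?, List.find?, kM, kTu, kW, kTh, kF, h1, h2]

-- After a matched two-letter code, A's scan at the second letter ('u' or 'h') finds nothing.
theorem pvGoA_skip (c : Char) (rest : List Char) (hc : c = 'u' ∨ c = 'h') :
    pvGoA (c :: rest) = pvGoA rest := by
  have h1 : pvAllDays.get? (String.ofList [c]) = none := by
    rw [pvLookup1]; rcases hc with h | h <;> subst h <;> decide
  cases rest with
  | nil =>
    simp only [pvGoA, h1, List.take]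
  | cons d tl =>
    have h2 : pvAllDays.get? (String.ofList [c, d]) = none := by
      rw [pvLookup2]; rcases hc with h | h <;> subst h <;> simp
    simp only [pvGoA, h1, List.take, h2]

theorem pvGoA_eq_pvGoB (cs : List Char) : pvGoA cs = pvGoB cs := by
  induction cs using pvGoB.induct with
  | case1 => rfl
  | case2 c v h => simp [pvGoA, pvGoB, h]
  | case3 c h => simp [pvGoA, pvGoB, h]
  | case4 c1 c2 rest v h2 ih =>
    have hcase := pvLookup2 c1 c2
    rw [h2] at hcase
    have h1 : pvAllDays.get? (String.ofList [c1]) = none := by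
      rw [pvLookup1]
      split_ifs at hcase with hu hh <;> simp_all
    have hc2 : c2 = 'u' ∨ c2 = 'h' := by
      split_ifs at hcase with hu hh
      · exact Or.inl hu.2
      · exact Or.inr hh.2
    rw [pvGoA]
    simp only [h1, List.take, h2]
    rw [pvGoA_skip c2 rest hc2, ih, pvGoB]
    simp only [h2]
  | case5 c1 c2 rest h2 v h1 ih =>
    rw [pvGoA]
    simp only [h1, ih]
    rw [pvGoB]
    simp only [h1, h2]
  | case6 c1 c2 rest h2 h1 ih =>
    rw [pvGoA]
    simp only [h1, List.take, h2, ih]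
    rw [pvGoB]
    simp only [h1, h2]

-- ===== VERDICT (by name: the statement is the Claim_ definition above) =====
theorem split_days_spec : Claim_equal_split_days := by
  intro days _
  unfold Spec_split_days split_days split_days_alt
  exact pvGoA_eq_pvGoB days.toList
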